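-- pv_equiv track=rewrite | github.com/vinchinzu/euler | python/785.py | gcds
-- ===== SOURCE A (Python) =====
-- from typing import List
--
-- def gcds(limit: int) -> List[List[int]]:
--     """Precompute GCD table."""
--     result = [[0] * limit for _ in range(limit)]
--     for i in range(limit):
--         for j in range(limit):
--             a, b = i, j
--             while b:
--                 a, b = b, a % b
--             result[i][j] = a
--     return result
-- ===== SOURCE B (Python) =====
-- from typing import List
--
-- def gcds(limit: int) -> List[List[int]]:
--     """Precompute GCD table via the recurrence gcd(i,j) = tri[j][i % j] for 0<j<i."""
--     tri = []  # tri[i] holds [gcd(i,0), ..., gcd(i,i)]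
--     for i in range(limit):
--         row = [i]                      # gcd of i with zero is i
--         for j in range(1, i):
--             row.append(tri[j][i % j])  # gcd(i, j) = gcd(j, i mod j), already computed
--         if i > 0:
--             row.append(i)              # gcd(i, i) = i
--         tri.append(row)
--     # mirror the triangle: gcd(i, j) = gcd(j, i) for j > i
--     return [tri[i] + [tri[j][i] for j in range(i + 1, limit)] for i in range(limit)]
-- ===== Notes on version B (the rewrite author's own statement) =====
-- stated objective: alternative
-- what changed: Replaces the per-cell Euclidean while-loop with a dynamic program: each lower-triangle gcd cell is a single table lookup tri[j][i%j] into already-computed rows, and the upper triangle is filled by mirroring the symmetric lower triangle.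
import Mathlib
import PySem

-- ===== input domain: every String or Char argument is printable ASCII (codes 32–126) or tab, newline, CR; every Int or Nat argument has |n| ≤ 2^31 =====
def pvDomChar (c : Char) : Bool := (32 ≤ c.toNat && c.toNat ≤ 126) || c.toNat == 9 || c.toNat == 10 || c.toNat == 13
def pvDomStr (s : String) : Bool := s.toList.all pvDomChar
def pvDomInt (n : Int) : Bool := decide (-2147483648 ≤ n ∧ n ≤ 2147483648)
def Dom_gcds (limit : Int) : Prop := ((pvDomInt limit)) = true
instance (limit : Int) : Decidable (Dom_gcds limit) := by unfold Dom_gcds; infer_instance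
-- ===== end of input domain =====

-- B computes each gcd cell by one table lookup (gcd(i,j) = tri[j][i mod j]) into already-computed
-- rows instead of A's per-cell Euclidean while-loop, mirroring the symmetric lower triangle.

-- ===== PORT A =====
-- termination fact for the while-loop: |a % b| < |b| when b ≠ 0 (Python mod)
theorem pv_mod_natAbs_lt (a b : Int) (hb : ¬ b = 0) :
    (PySem.Int.mod a b).natAbs < b.natAbs := by
  rcases lt_or_gt_of_ne hb with h | h
  · have h2 := PySem.Int.mod_neg_bounds a h
    omega
  · have h1 := PySem.Int.mod_nonneg a h
    have h2 := PySem.Int.mod_lt a h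
    omega

-- "a, b = i, j; while b: a, b = b, a % b" — returns a
def gcds_euclid (a b : Int) : Int :=
  if _hb : b = 0 then a else gcds_euclid b (PySem.Int.mod a b)
termination_by b.natAbs
decreasing_by exact pv_mod_natAbs_lt a b _hb

-- result starts as a limit×limit zero table and EVERY cell result[i][j] is then overwritten
-- with the Euclid value, in row-major order; ported as producing the cells in that same order.
def gcds (limit : Int) : List (List Int) :=
  (PySem.List.pyRange 0 limit 1).map (fun i =>
    (PySem.List.pyRange 0 limit 1).map (fun j => gcds_euclid i j))

-- ===== PORT B =====
def gcds_alt (limit : Int) : List (List Int) :=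
  let tri := (PySem.List.pyRange 0 limit 1).foldl (fun tri i =>
    let row := (PySem.List.pyRange 1 i 1).foldl (fun row j =>
      row ++ [PySem.List.pyGetD (PySem.List.pyGetD tri j []) (PySem.Int.mod i j) 0]) [i]
    let row := if 0 < i then row ++ [i] else row
    tri ++ [row]) []
  (PySem.List.pyRange 0 limit 1).map (fun i =>
    PySem.List.pyGetD tri i [] ++
      (PySem.List.pyRange (i + 1) limit 1).map (fun j =>
        PySem.List.pyGetD (PySem.List.pyGetD tri j []) i 0))

-- ===== PRECONDITION & SPEC =====
def Spec_gcds (limit : Int) (out : List (List Int)) : Prop := out = gcds_alt limit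
instance (limit : Int) (out : List (List Int)) : Decidable (Spec_gcds limit out) := by unfold Spec_gcds; infer_instance

-- ===== CLAIM (what is proved, stated in full; the proofs are below) =====
def Claim_equal_gcds : Prop := ∀ (limit : Int), Dom_gcds limit → Spec_gcds limit (gcds limit)

-- ===== LEMMAS AND PROOFS =====

-- the mathematical table both ports compute
def pvG (i j : Nat) : Int := (Nat.gcd i j : Int)

def pvTriSpec (n : Nat) : List (List Int) :=
  (List.range n).map (fun r => (List.range (r + 1)).map (fun c => pvG r c))

def pvTable (n : Nat) : List (List Int) :=
  (List.range n).map (fun i => (List.range n).map (fun j => pvG i j))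

theorem pv_euclid_eq (b a : Nat) : gcds_euclid (a : Int) (b : Int) = pvG a b := by
  induction b using Nat.strong_induction_on generalizing a with
  | _ b ih =>
    rw [gcds_euclid]
    by_cases hb : (b : Int) = 0
    · have : b = 0 := by exact_mod_cast hb
      simp [this, pvG]
    · have hbn : b ≠ 0 := by exact_mod_cast hb
      rw [dif_neg hb, PySem.Int.mod_natCast, ih (a % b) (Nat.mod_lt _ (Nat.pos_of_ne_zero hbn)) b]
      unfold pvG
      rw [Nat.gcd_comm b (a % b), ← Nat.gcd_rec b a, Nat.gcd_comm b a]

theorem pv_gcds_eq (limit : Int) : gcds limit = pvTable limit.toNat := by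
  simp [gcds, pvTable, PySem.List.pyRange_zero, List.map_map, Function.comp, pv_euclid_eq]

theorem pv_triSpec_get (n r : Nat) (hr : r < n) :
    PySem.List.pyGetD (pvTriSpec n) (r : Int) [] = (List.range (r + 1)).map (fun c => pvG r c) := by
  rw [PySem.List.pyGetD_eq_getElem _ _ (by positivity)
      (by simp [pvTriSpec]; exact_mod_cast hr)]
  simp [pvTriSpec]

theorem pv_row_get (r c : Nat) (hc : c < r + 1) :
    PySem.List.pyGetD ((List.range (r + 1)).map (fun c => pvG r c)) (c : Int) 0 = pvG r c := by
  rw [PySem.List.pyGetD_eq_getElem _ _ (by positivity) (by simpa using (by exact_mod_cast hc : (c : Int) < ((r:Int) + 1)))]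
  simp

-- inner loop invariant: after folding j = 1 .. m-1, row holds gcd(n, 0..m-1)
theorem pv_inner (n m : Nat) (h1 : 1 ≤ m) (hm : m ≤ n) :
    (PySem.List.pyRange 1 (m : Int) 1).foldl (fun row j =>
        row ++ [PySem.List.pyGetD (PySem.List.pyGetD (pvTriSpec n) j [])
          (PySem.Int.mod (n : Int) j) 0]) [(n : Int)]
      = (List.range m).map (fun c => pvG n c) := by
  induction m with
  | zero => omega
  | succ m ih =>
    by_cases hm1 : m = 0
    · subst hm1
      rw [PySem.List.pyRange_one_eq_nil (by norm_num)]
      simp [pvG]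
    · have hmn : m < n := by omega
      have : ((m : Int) + 1) = ((m + 1 : Nat) : Int) := by push_cast; ring
      rw [← this, PySem.List.pyRange_one_succ_right (by exact_mod_cast Nat.one_le_iff_ne_zero.mpr hm1),
        List.foldl_append, ih (by omega) (by omega)]
      simp only [List.foldl_cons, List.foldl_nil]
      rw [pv_triSpec_get n m hmn, PySem.Int.mod_natCast,
        pv_row_get m (n % m) (by have := Nat.mod_lt n (Nat.pos_of_ne_zero hm1); omega)]
      have : pvG m (n % m) = pvG n m := by
        unfold pvG
        rw [Nat.gcd_comm m (n % m), ← Nat.gcd_rec m n, Nat.gcd_comm m n]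
      rw [this, List.range_succ]
      simp

theorem pvTriSpec_succ (n : Nat) :
    pvTriSpec (n + 1) = pvTriSpec n ++ [(List.range (n + 1)).map (fun c => pvG n c)] := by
  simp [pvTriSpec, List.range_succ]

-- one outer step appends the next triangle row
theorem pv_step (n : Nat) :
    (fun tri (i : Int) =>
        let row := (PySem.List.pyRange 1 i 1).foldl (fun row j =>
          row ++ [PySem.List.pyGetD (PySem.List.pyGetD tri j []) (PySem.Int.mod i j) 0]) [i]
        let row := if 0 < i then row ++ [i] else row
        tri ++ [row]) (pvTriSpec n) (n : Int)
      = pvTriSpec (n + 1) := by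
  show pvTriSpec n ++ [_] = pvTriSpec (n + 1)
  rw [pvTriSpec_succ]
  congr 1
  by_cases hn : n = 0
  · subst hn
    rw [PySem.List.pyRange_one_eq_nil (by norm_num)]
    simp [pvG]
  · have h1 : (0 : Int) < (n : Int) := by exact_mod_cast Nat.pos_of_ne_zero hn
    rw [pv_inner n n (by omega) (le_refl n)]
    simp only [if_pos h1, List.range_succ, List.map_append, List.map_cons, List.map_nil]
    congr 2
    simp [pvG]

theorem pv_tri_eq (limit : Int) :
    (PySem.List.pyRange 0 limit 1).foldl (fun tri i =>
        let row := (PySem.List.pyRange 1 i 1).foldl (fun row j =>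
          row ++ [PySem.List.pyGetD (PySem.List.pyGetD tri j []) (PySem.Int.mod i j) 0]) [i]
        let row := if 0 < i then row ++ [i] else row
        tri ++ [row]) []
      = pvTriSpec limit.toNat := by
  rw [PySem.List.pyRange_zero]
  generalize limit.toNat = n
  induction n with
  | zero => simp [pvTriSpec]
  | succ n ih =>
    rw [List.range_succ, List.map_append, List.foldl_append, ih]
    simpa using pv_step n

theorem pv_gcds_alt_eq (limit : Int) : gcds_alt limit = pvTable limit.toNat := by
  unfold gcds_alt
  rw [pv_tri_eq, PySem.List.pyRange_zero, pvTable, List.map_map]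
  apply List.map_congr_left
  intro i hi
  have hin : i < limit.toNat := List.mem_range.mp hi
  simp only [Function.comp]
  rw [pv_triSpec_get _ i hin]
  have hrange : PySem.List.pyRange ((i : Int) + 1) limit 1
      = (List.range (limit.toNat - (i + 1))).map (fun k => ((i + 1 + k : Nat) : Int)) := by
    rw [PySem.List.pyRange_one]
    have h2 : (limit - ((i : Int) + 1)).toNat = limit.toNat - (i + 1) := by omega
    rw [h2]
    apply List.map_congr_left
    intro k _
    push_cast; ring
  rw [hrange, List.map_map]
  have hsplit : limit.toNat = (i + 1) + (limit.toNat - (i + 1)) := by omega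
  conv_rhs => rw [hsplit, List.range_add, List.map_append, List.map_map]
  congr 1
  apply List.map_congr_left
  intro k hk
  have hk' : k < limit.toNat - (i + 1) := List.mem_range.mp hk
  simp only [Function.comp]
  rw [pv_triSpec_get _ (i + 1 + k) (by omega), pv_row_get (i + 1 + k) i (by omega)]
  unfold pvG
  rw [Nat.gcd_comm]

-- ===== VERDICT (by name: the statement is the Claim_ definition above) =====
theorem gcds_spec : Claim_equal_gcds := by
  intro limit _
  unfold Spec_gcds
  rw [pv_gcds_eq, pv_gcds_alt_eq]
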